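-- pv_equiv track=rewrite | github.com/HarivaradhanKM/Python_Coding | IDP - Answers/IDP 3 Easy 1.py | get_right_left_differences
-- ===== SOURCE A (Python) =====
-- def get_right_left_differences(n, numbers):
--     left_sum = []
--     right_sum = []
--
--     for index in range(n):
--         left_sum.append(sum(numbers[:index]))
--         right_sum.append(sum(numbers[index + 1:]))
--
--     difference = []
--
--     for index in range(n):
--         difference.append(str(right_sum[index] - left_sum[index]))
--
--     return difference
-- ===== SOURCE B (Python) =====
-- def get_right_left_differences(n, numbers):
--     # prefix[k] = sum of the first k numbers, so sum(numbers[:i]) == prefix[min(i, len(numbers))]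
--     prefix = [0]
--     for x in numbers:
--         prefix.append(prefix[-1] + x)
--     total = prefix[-1]
--     last = len(numbers)
--     difference = []
--     for index in range(n):
--         left = prefix[min(index, last)]
--         right = total - prefix[min(index + 1, last)]
--         difference.append(str(right - left))
--     return difference
-- ===== Notes on version B (the rewrite author's own statement) =====
-- stated objective: faster
-- what changed: Replaces the per-index list slices and re-summations with a prefix-sum array built in one pass; each difference is then total minus two clamped prefix-array lookups.
import Mathlib
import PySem

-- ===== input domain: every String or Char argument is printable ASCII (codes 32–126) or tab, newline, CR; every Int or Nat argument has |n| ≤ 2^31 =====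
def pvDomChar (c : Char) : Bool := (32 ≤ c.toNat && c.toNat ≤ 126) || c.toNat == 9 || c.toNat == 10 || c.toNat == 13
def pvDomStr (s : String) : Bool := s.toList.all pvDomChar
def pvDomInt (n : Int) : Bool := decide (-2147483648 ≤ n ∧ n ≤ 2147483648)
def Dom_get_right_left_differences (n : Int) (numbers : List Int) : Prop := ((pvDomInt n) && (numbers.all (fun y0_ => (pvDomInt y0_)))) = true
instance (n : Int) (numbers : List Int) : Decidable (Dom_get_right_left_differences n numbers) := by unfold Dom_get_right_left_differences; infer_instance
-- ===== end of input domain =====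

-- B replaces the per-index slices/re-summations with a prefix-sum array and clamped lookups (faster).
-- ===== PORT A =====
def get_right_left_differences (n : Int) (numbers : List Int) : List String :=
  let left_sum : List Int :=
    (PySem.List.pyRange 0 n 1).foldl
      (fun ls index => ls ++ [(PySem.List.slice numbers none (some index)).sum]) []
  let right_sum : List Int :=
    (PySem.List.pyRange 0 n 1).foldl
      (fun rs index => rs ++ [(PySem.List.slice numbers (some (index + 1)) none).sum]) []
  (PySem.List.pyRange 0 n 1).foldl
    (fun d index =>
      d ++ [PySem.Int.toStr (PySem.List.pyGetD right_sum index 0 - PySem.List.pyGetD left_sum index 0)]) []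

-- ===== PORT B =====
def get_right_left_differences_alt (n : Int) (numbers : List Int) : List String :=
  let pfx : List Int :=
    numbers.foldl (fun p x => p ++ [PySem.List.pyGetD p (-1) 0 + x]) [0]
  let total : Int := PySem.List.pyGetD pfx (-1) 0
  let last : Int := numbers.length
  (PySem.List.pyRange 0 n 1).foldl
    (fun d index =>
      let left := PySem.List.pyGetD pfx (min index last) 0
      let right := total - PySem.List.pyGetD pfx (min (index + 1) last) 0
      d ++ [PySem.Int.toStr (right - left)]) []

-- ===== PRECONDITION & SPEC =====
def Spec_get_right_left_differences (n : Int) (numbers : List Int) (out : List String) : Prop := out = get_right_left_differences_alt n numbers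
instance (n : Int) (numbers : List Int) (out : List String) : Decidable (Spec_get_right_left_differences n numbers out) := by unfold Spec_get_right_left_differences; infer_instance

-- ===== CLAIM (what is proved, stated in full; the proofs are below) =====
def Claim_equal_get_right_left_differences : Prop := ∀ (n : Int) (numbers : List Int), Dom_get_right_left_differences n numbers → Spec_get_right_left_differences n numbers (get_right_left_differences n numbers)

-- ===== LEMMAS AND PROOFS =====

-- proof-only: the value of B's prefix list
def pvMapPrefix (l : List Int) : List Int :=
  (List.range (l.length + 1)).map (fun k => (l.take k).sum)

theorem pvMapPrefix_split (l : List Int) :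
    pvMapPrefix l = (List.range l.length).map (fun k => (l.take k).sum) ++ [l.sum] := by
  unfold pvMapPrefix
  rw [List.range_succ, List.map_append]
  simp

theorem pvMapPrefix_snoc (l : List Int) (x : Int) :
    pvMapPrefix (l ++ [x]) = pvMapPrefix l ++ [l.sum + x] := by
  unfold pvMapPrefix
  simp only [List.length_append, List.length_singleton]
  rw [List.range_succ, List.map_append]
  congr 1
  · apply List.map_congr_left
    intro k hk
    have hk' : k ≤ l.length := by
      have := List.mem_range.1 hk; omega
    rw [List.take_append_of_le_length hk']
  · simp

theorem pvPrefix_eq (numbers : List Int) :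
    numbers.foldl (fun p x => p ++ [PySem.List.pyGetD p (-1) 0 + x]) [0] = pvMapPrefix numbers := by
  have key : ∀ (todo done : List Int),
      todo.foldl (fun p x => p ++ [PySem.List.pyGetD p (-1) 0 + x]) (pvMapPrefix done)
        = pvMapPrefix (done ++ todo) := by
    intro todo
    induction todo with
    | nil => intro done; simp
    | cons x xs ih =>
      intro done
      have hstep : pvMapPrefix done ++ [PySem.List.pyGetD (pvMapPrefix done) (-1) 0 + x]
          = pvMapPrefix (done ++ [x]) := by
        rw [pvMapPrefix_snoc]
        congr 2
        rw [pvMapPrefix_split, PySem.List.pyGetD_neg_one_append_singleton]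
      rw [List.foldl_cons, hstep, ih (done ++ [x]), List.append_assoc]
      rfl
  have h0 : pvMapPrefix [] = [0] := by decide
  have := key numbers []
  rw [h0] at this
  simpa using this

theorem pvPrefix_get (l : List Int) (k : Int) (h0 : 0 ≤ k) (hk : k ≤ (l.length : Int)) :
    PySem.List.pyGetD (pvMapPrefix l) k 0 = (l.take k.toNat).sum := by
  have hlen : (pvMapPrefix l).length = l.length + 1 := by
    unfold pvMapPrefix; simp
  have hlt : k < ((pvMapPrefix l).length : Int) := by rw [hlen]; push_cast; omega
  rw [PySem.List.pyGetD_eq_getElem _ _ h0 hlt]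
  unfold pvMapPrefix
  simp

theorem pvPrefix_total (l : List Int) :
    PySem.List.pyGetD (pvMapPrefix l) (-1) 0 = l.sum := by
  rw [pvMapPrefix_split, PySem.List.pyGetD_neg_one_append_singleton]

theorem pv_take_min (l : List Int) (i : Int) (h0 : 0 ≤ i) :
    (l.take (min i (l.length : Int)).toNat).sum = (l.take i.toNat).sum := by
  by_cases h : i ≤ (l.length : Int)
  · rw [min_eq_left h]
  · rw [min_eq_right (by omega)]
    rw [Int.toNat_natCast, List.take_length, List.take_of_length_le (by omega)]

theorem pv_sum_take_drop (l : List Int) (k : Nat) :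
    (l.take k).sum + (l.drop k).sum = l.sum := by
  rw [← List.sum_append, List.take_append_drop]

-- A's result is the map of the slice-based pointwise value
theorem pvA_eq_map (n : Int) (numbers : List Int) :
    get_right_left_differences n numbers =
      (PySem.List.pyRange 0 n 1).map (fun i =>
        PySem.Int.toStr ((PySem.List.slice numbers (some (i + 1)) none).sum
          - (PySem.List.slice numbers none (some i)).sum)) := by
  unfold get_right_left_differences
  rw [PySem.List.foldl_append_singleton_eq_map, PySem.List.foldl_append_singleton_eq_map,
    PySem.List.foldl_append_singleton_eq_map]
  simp only [List.nil_append]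
  apply List.map_congr_left
  intro i hi
  rcases (PySem.List.mem_pyRange_one).1 hi with ⟨h0, hn⟩
  rw [PySem.List.pyGetD_map_pyRange_of_nonneg _ n i 0 h0 hn,
    PySem.List.pyGetD_map_pyRange_of_nonneg _ n i 0 h0 hn]

-- ===== VERDICT (by name: the statement is the Claim_ definition above) =====
theorem get_right_left_differences_spec : Claim_equal_get_right_left_differences := by
  intro n numbers _
  show get_right_left_differences n numbers = get_right_left_differences_alt n numbers
  rw [pvA_eq_map]
  unfold get_right_left_differences_alt
  simp only [pvPrefix_eq]
  rw [PySem.List.foldl_append_singleton_eq_map]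
  simp only [List.nil_append]
  apply List.map_congr_left
  intro i hi
  rcases (PySem.List.mem_pyRange_one).1 hi with ⟨h0, _⟩
  rw [PySem.List.slice_from numbers (by omega), PySem.List.slice_to numbers h0]
  rw [pvPrefix_total]
  rw [pvPrefix_get numbers (min i (numbers.length : Int)) (by omega) (by omega)]
  rw [pvPrefix_get numbers (min (i + 1) (numbers.length : Int)) (by omega) (by omega)]
  rw [pv_take_min numbers i h0, pv_take_min numbers (i + 1) (by omega)]
  congr 1
  have := pv_sum_take_drop numbers (i + 1).toNat
  omega
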